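-- pv_equiv track=rewrite | github.com/prasojojiwandono/logic | yttrium2019(codility_challenge).py | solution
-- ===== SOURCE A (Python) =====
-- def solution(S, K):
-- 	a=[b for b in S]
-- 	aw = 0
-- 	ak = 0
-- 	ko = 96 + K
-- 	for i in range(len(a)):
-- 		aw = aw + 1
-- 		if ord(a[i])>ko :
-- 			break
-- 	for i in range(len(a)):
-- 		ak = ak + 1
-- 		if ord(a[len(a)-1-i]) > ko:
-- 			break
-- 	if ak+aw -2 >= len(a):
-- 		return -1
-- 	else :
-- 		return len(a)-(ak+aw-2)
-- ===== SOURCE B (Python) =====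
-- def solution(S, K):
--     ko = 96 + K
--     span = 0   # length from the first boundary char to the last boundary char seen so far
--     run = 0    # chars seen since the first boundary char (inclusive), 0 before any boundary
--     for c in S:
--         if run:
--             run += 1
--         if ord(c) > ko:
--             if run == 0:
--                 run = 1
--             span = run
--     return span if span else -1
-- ===== Notes on version B (the rewrite author's own statement) =====
-- stated objective: faster
-- what changed: Replaces A's two early-exit scans (one from each end of the string) plus the aw+ak-2 arithmetic by a single forward streaming pass with two accumulators (run = chars since the first above-threshold char, span = span up to the last one seen), returning span directly and -1 when no such char exists; no character list is materialized and no indexing is done.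
-- intended difference: On strings of length <= 1 containing no character above the threshold, A returns 2 (empty string) or 1 (single char) as a leftover of its aw+ak-2 arithmetic, while B returns -1, the 'no boundary found' answer A itself gives on every longer such string; -1 is the intended value. — e.g. on solution("", 2): A returns 2, B returns -1
import Mathlib
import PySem

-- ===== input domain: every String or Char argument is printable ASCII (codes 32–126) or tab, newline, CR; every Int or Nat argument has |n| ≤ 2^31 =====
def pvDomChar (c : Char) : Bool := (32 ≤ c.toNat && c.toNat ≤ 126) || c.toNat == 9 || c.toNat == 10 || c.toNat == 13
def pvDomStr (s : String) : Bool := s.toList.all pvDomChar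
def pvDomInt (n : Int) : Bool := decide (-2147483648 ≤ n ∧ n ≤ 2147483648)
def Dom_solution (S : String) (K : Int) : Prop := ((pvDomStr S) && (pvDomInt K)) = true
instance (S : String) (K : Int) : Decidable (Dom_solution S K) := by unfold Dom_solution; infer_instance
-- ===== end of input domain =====

-- B replaces A's two early-exit end scans + aw+ak-2 arithmetic by a single forward streaming
-- pass with two accumulators (run/span), directly measuring the first-to-last boundary span;
-- on length ≤ 1 strings without a boundary char B returns -1 (A's own 'no result' answer)
-- where A returns 2 or 1 (objective: faster by a constant factor: one pass, no list build/indexing).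


-- ===== PORT A =====
-- ord(c) in Python: the code point
def pvOrd (c : Char) : Int := (c.toNat : Int)

-- 'for i in range(len(a)): acc += 1; if ord(a[i]) > ko: break' — the obvious structural
-- recursion over the characters visited in order (front loop: a; back loop: a.reverse,
-- since a[len(a)-1-i] walks a back to front), carrying the counter.
def solLoop (ko : Int) : List Char → Int → Int
  | [], acc => acc
  | c :: rest, acc => if pvOrd c > ko then acc + 1 else solLoop ko rest (acc + 1)

def solution (S : String) (K : Int) : Int :=
  let a := S.toList
  let ko := 96 + K
  let aw := solLoop ko a 0
  let ak := solLoop ko a.reverse 0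
  if ak + aw - 2 ≥ (a.length : Int) then -1 else (a.length : Int) - (ak + aw - 2)

-- ===== PORT B =====
-- Source B's single forward pass: state (span, run); 'if run: run += 1', then on a boundary
-- char 'if run == 0: run = 1; span = run'.
def altLoop (ko : Int) : List Char → Int × Int → Int × Int
  | [], st => st
  | c :: rest, (span, run) =>
    let run1 := if run ≠ 0 then run + 1 else run
    if pvOrd c > ko then
      let run2 := if run1 = 0 then 1 else run1
      altLoop ko rest (run2, run2)
    else
      altLoop ko rest (span, run1)

def solution_alt (S : String) (K : Int) : Int :=
  let ko := 96 + K
  let st := altLoop ko S.toList (0, 0)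
  if st.1 ≠ 0 then st.1 else -1

-- ===== PRECONDITION & SPEC =====
-- On strings of length ≤ 1 with no character above the threshold, A returns 2 (empty) or 1
-- (single char) — leftovers of its aw+ak-2 arithmetic — while B returns -1, the 'no boundary
-- found' answer A itself gives on every longer such string; -1 is the intended value.
def D_solution (S : String) (K : Int) : Prop :=
  S.toList.length ≤ 1 ∧ S.toList.all (fun c => decide ((c.toNat : Int) ≤ 96 + K)) = true
instance (S : String) (K : Int) : Decidable (D_solution S K) := by unfold D_solution; infer_instance

def Spec_solution (S : String) (K : Int) (out : Int) : Prop := ¬ D_solution S K → out = solution_alt S K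
instance (S : String) (K : Int) (out : Int) : Decidable (Spec_solution S K out) := by unfold Spec_solution; infer_instance

def pvDiffWitness_solution : String × Int := ("", 2)
def pvDiffWitnessOut_solution : Int × Int := (2, -1)

-- ===== CLAIM (what is proved, stated in full; the proofs are below) =====
def Claim_unchanged_solution : Prop := ∀ (S : String) (K : Int), Dom_solution S K → Spec_solution S K (solution S K)
def Claim_changed_solution : Prop := Dom_solution (pvDiffWitness_solution.1) (pvDiffWitness_solution.2) ∧ D_solution (pvDiffWitness_solution.1) (pvDiffWitness_solution.2) ∧ solution (pvDiffWitness_solution.1) (pvDiffWitness_solution.2) = pvDiffWitnessOut_solution.1 ∧ solution_alt (pvDiffWitness_solution.1) (pvDiffWitness_solution.2) = pvDiffWitnessOut_solution.2 ∧ pvDiffWitnessOut_solution.1 ≠ pvDiffWitnessOut_solution.2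
def Claim_exact_solution : Prop := ∀ (S : String) (K : Int), Dom_solution S K → D_solution S K → solution S K ≠ solution_alt S K

-- ===== LEMMAS AND PROOFS =====

-- first-match index of 'pvOrd c > ko' in a list, if any
def pvF (ko : Int) : List Char → Option Nat
  | [] => none
  | c :: rest => if pvOrd c > ko then some 0 else (pvF ko rest).map (· + 1)

-- last-match index
def pvL (ko : Int) : List Char → Option Nat
  | [] => none
  | c :: rest =>
    match pvL ko rest with
    | some k => some (k + 1)
    | none => if pvOrd c > ko then some 0 else none

theorem pvF_lt {ko : Int} {l : List Char} {k : Nat} (h : pvF ko l = some k) : k < l.length := by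
  induction l generalizing k with
  | nil => simp [pvF] at h
  | cons c rest ih =>
    simp only [pvF] at h
    split at h
    · simp_all; omega
    · simp only [Option.map_eq_some_iff] at h
      obtain ⟨k', hk', rfl⟩ := h
      have := ih hk'; simp; omega

theorem pvL_lt {ko : Int} {l : List Char} {k : Nat} (h : pvL ko l = some k) : k < l.length := by
  induction l generalizing k with
  | nil => simp [pvL] at h
  | cons c rest ih =>
    simp only [pvL] at h
    split at h
    · rename_i k' hk'
      have := ih hk'; simp_all; omega
    · split at h
      · simp_all; omega
      · simp at h

theorem pvF_le_pvL {ko : Int} {l : List Char} {k m : Nat}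
    (hf : pvF ko l = some k) (hl : pvL ko l = some m) : k ≤ m := by
  induction l generalizing k m with
  | nil => simp [pvF] at hf
  | cons c rest ih =>
    simp only [pvF] at hf
    simp only [pvL] at hl
    by_cases h : pvOrd c > ko
    · simp [h] at hf; omega
    · simp only [if_neg h, Option.map_eq_some_iff] at hf
      obtain ⟨k', hk', rfl⟩ := hf
      cases hrest : pvL ko rest with
      | none => rw [(by simpa [pvL] using hrest : pvL ko rest = none)] at hl; simp [h] at hl
      | some m' =>
        rw [hrest] at hl
        simp only [Option.some_inj] at hl
        subst hl
        have := ih hk' hrest; omega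

theorem solLoop_eq (ko : Int) (l : List Char) (acc : Int) :
    solLoop ko l acc = acc + (match pvF ko l with
      | some k => (k : Int) + 1
      | none => (l.length : Int)) := by
  induction l generalizing acc with
  | nil => simp [solLoop, pvF]
  | cons c rest ih =>
    simp only [solLoop, pvF]
    by_cases h : pvOrd c > ko
    · simp [h]
    · simp only [if_neg h, ih]
      cases hf : pvF ko rest <;> simp [hf] <;> push_cast <;> ring

theorem pvF_append (ko : Int) (xs ys : List Char) :
    pvF ko (xs ++ ys) = match pvF ko xs with
      | some k => some k
      | none => (pvF ko ys).map (· + xs.length) := by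
  induction xs with
  | nil => simp [pvF]
  | cons c rest ih =>
    simp only [List.cons_append, pvF, ih]
    by_cases h : pvOrd c > ko
    · simp [h]
    · simp only [if_neg h]
      cases hf : pvF ko rest <;> cases hg : pvF ko ys <;>
        simp [hf, hg, Option.map_map, Function.comp] <;> omega

theorem pvF_reverse (ko : Int) (l : List Char) :
    pvF ko l.reverse = (pvL ko l).map (fun k => l.length - (1 + k)) := by
  induction l with
  | nil => simp [pvF, pvL]
  | cons c rest ih =>
    simp only [List.reverse_cons, pvF_append, ih, pvL]
    cases hl : pvL ko rest with
    | some k =>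
      have hk := pvL_lt hl
      simp [hl]; omega
    | none =>
      simp only [hl, Option.map_none]
      by_cases h : pvOrd c > ko <;> simp [pvF, h]

theorem pvL_eq_none_iff (ko : Int) (l : List Char) : pvL ko l = none ↔ pvF ko l = none := by
  induction l with
  | nil => simp [pvL, pvF]
  | cons c rest ih =>
    simp only [pvL, pvF]
    by_cases h : pvOrd c > ko
    · cases hl : pvL ko rest <;> simp [h, hl]
    · simp only [if_neg h]
      cases hl : pvL ko rest with
      | none => simp [ih.mp hl]
      | some k =>
        have hf : pvF ko rest ≠ none := fun hn => by rw [ih.mpr hn] at hl; cases hl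
        cases hfe : pvF ko rest with
        | none => exact absurd hfe hf
        | some j => simp

theorem pvF_none_iff (ko : Int) (l : List Char) :
    pvF ko l = none ↔ l.all (fun c => decide (pvOrd c ≤ ko)) = true := by
  induction l with
  | nil => simp [pvF]
  | cons c rest ih =>
    simp only [pvF, List.all_cons]
    by_cases h : pvOrd c > ko
    · simp [h]
    · simp [h, ih]; omega

theorem solLoop_reverse_eq (ko : Int) (l : List Char) :
    solLoop ko l.reverse 0 =
      match pvL ko l with
      | some m => (l.length : Int) - (m : Int)
      | none => (l.length : Int) := by
  rw [solLoop_eq, pvF_reverse]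
  cases hl : pvL ko l with
  | none => simp
  | some m =>
    have hm := pvL_lt hl
    simp only [Option.map_some]
    have e1 : ((l.length - (1 + m) : Nat) : Int) = (l.length : Int) - 1 - (m : Int) := by omega
    rw [e1]
    ring

-- invariant for B's loop after the first boundary char: run ≥ 1 counts the chars since the
-- first boundary (inclusive); span is then the first-to-last span seen so far.
theorem altLoop_run_pos (ko : Int) (l : List Char) (span run : Int) (hrun : 1 ≤ run) :
    altLoop ko l (span, run) =
      match pvL ko l with
      | some m => (run + (m : Int) + 1, run + (l.length : Int))
      | none => (span, run + (l.length : Int)) := by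
  induction l generalizing span run with
  | nil => simp [altLoop, pvL]
  | cons c rest ih =>
    simp only [altLoop]
    split_ifs <;>
      first
        | omega
        | (rw [ih _ _ (by omega)]
           cases hl : pvL ko rest <;>
             simp only [pvL, hl, Prod.mk.injEq, List.length_cons] <;>
             (try split_ifs) <;> push_cast <;> (try simp) <;> omega)

theorem altLoop_start (ko : Int) (l : List Char) :
    altLoop ko l (0, 0) =
      match pvF ko l, pvL ko l with
      | some k, some m => ((m : Int) - (k : Int) + 1, (l.length : Int) - (k : Int))
      | _, _ => (0, 0) := by
  induction l with
  | nil => simp [altLoop, pvF]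
  | cons c rest ih =>
    simp only [altLoop, pvF, pvL]
    norm_num
    by_cases h : pvOrd c > ko
    · simp only [if_pos h]
      rw [altLoop_run_pos ko rest 1 1 le_rfl]
      cases hl : pvL ko rest <;>
        simp only [hl, Prod.mk.injEq, List.length_cons] <;>
        (try split_ifs) <;> push_cast <;> (try simp) <;> omega
    · simp only [if_neg h, ih]
      cases hf : pvF ko rest with
      | none =>
        have hl : pvL ko rest = none := (pvL_eq_none_iff ko rest).mpr hf
        simp [hf, hl, h]
      | some k =>
        cases hl : pvL ko rest with
        | none => rw [(pvL_eq_none_iff ko rest).mp hl] at hf; cases hf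
        | some m =>
          simp only [hf, hl, Prod.mk.injEq, List.length_cons] <;>
            (try split_ifs) <;> push_cast <;> (try simp) <;> omega

-- ===== VERDICT (by name: the statement is the Claim_ definition above) =====
theorem solution_spec : Claim_unchanged_solution := by
  intro S K _ hD
  unfold solution solution_alt
  dsimp only
  rw [altLoop_start, solLoop_reverse_eq, solLoop_eq]
  cases hf : pvF (96 + K) S.toList with
  | none =>
    have hl : pvL (96 + K) S.toList = none := (pvL_eq_none_iff _ _).mpr hf
    have hall := (pvF_none_iff _ _).mp hf
    have hn : 2 ≤ S.toList.length := by
      by_contra hc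
      exact hD ⟨by omega, hall⟩
    simp only [hf, hl]
    rw [if_pos (by push_cast; omega)]
    norm_num
  | some k =>
    cases hl : pvL (96 + K) S.toList with
    | none => rw [(pvL_eq_none_iff _ _).mp hl] at hf; cases hf
    | some m =>
      have hk := pvF_lt hf
      have hm := pvL_lt hl
      have hkm := pvF_le_pvL hf hl
      dsimp only
      split_ifs
      · linarith
      · rfl
      · ring
      · exfalso
        rename_i hne
        rw [not_not] at hne
        have hki : (k : Int) ≤ (m : Int) := by exact_mod_cast hkm
        linarith

theorem solution_changed : Claim_changed_solution := by
  unfold Claim_changed_solution; decide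

theorem solution_tight : Claim_exact_solution := by
  intro S K _ hDD
  obtain ⟨hlen, hall⟩ := hDD
  unfold solution solution_alt
  dsimp only
  have hf : pvF (96 + K) S.toList = none := (pvF_none_iff _ _).mpr hall
  have hl : pvL (96 + K) S.toList = none := (pvL_eq_none_iff _ _).mpr hf
  rw [altLoop_start, solLoop_reverse_eq, solLoop_eq]
  simp only [hf, hl]
  rw [if_neg (by push_cast; omega)]
  have hS : S.toList.length = S.length := by simp
  norm_num
  omega
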